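-- pv_equiv track=rewrite | github.com/Da-Collins/Coursework | ArtificialIntelligence/Project1/mustard_analytics.py | num_single_locs
-- ===== SOURCE A (Python) =====
-- def num_single_locs(rows):
--     """Return the number of refueling locations that were visited exactly once.
--
--     Hint: store the locations and counts (as keys and values, respectively) in a dictionary,
--     then count up the number of entries with a value equal to one.
--     """
--     count = 0
--     dict = {}
--     for r in rows:
--         if r[2] != None:
--             if r[2] in dict:
--                 dict[r[2]] = dict[r[2]] + 1
--             else:
--                 dict[r[2]] = 1
--     for location in dict:
--         if dict[location] == 1:
--             count = count + 1
--     #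
--     # fill in function body here
--     #
--     return count
-- ===== SOURCE B (Python) =====
-- def num_single_locs(rows):
--     """Return the number of refueling locations that were visited exactly once."""
--     seen_once = set()
--     seen_more = set()
--     for r in rows:
--         loc = r[2]
--         if loc is None:
--             continue
--         if loc in seen_more:
--             continue
--         if loc in seen_once:
--             seen_once.remove(loc)
--             seen_more.add(loc)
--         else:
--             seen_once.add(loc)
--     return len(seen_once)
-- ===== Notes on version B (the rewrite author's own statement) =====
-- stated objective: simpler
-- what changed: Replaces the location->count dictionary plus a second counting pass over the dict with a single pass maintaining two sets (seen exactly once / seen more than once) and returning the size of the first set.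
import Mathlib
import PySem

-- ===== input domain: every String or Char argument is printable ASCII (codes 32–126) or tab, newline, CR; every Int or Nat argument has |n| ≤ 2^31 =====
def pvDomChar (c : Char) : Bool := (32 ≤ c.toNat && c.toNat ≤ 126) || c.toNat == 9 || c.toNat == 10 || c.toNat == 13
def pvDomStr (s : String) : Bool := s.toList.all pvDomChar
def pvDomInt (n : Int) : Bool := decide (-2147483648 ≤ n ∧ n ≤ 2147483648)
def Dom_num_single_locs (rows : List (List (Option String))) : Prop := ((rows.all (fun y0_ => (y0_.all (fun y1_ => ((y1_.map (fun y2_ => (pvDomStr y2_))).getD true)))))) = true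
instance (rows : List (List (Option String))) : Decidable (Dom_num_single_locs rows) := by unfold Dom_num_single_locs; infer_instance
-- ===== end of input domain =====

-- B replaces the location→count dictionary and the second counting pass with one pass over two sets
-- (seen exactly once / seen more than once), returning the size of the first set (objective: simpler).

-- ===== PORT A =====
-- r[2] is ported as pyGetD r 2 none, exact under Pre_ (index 2 in range, so no IndexError is conflated).
def num_single_locs (rows : List (List (Option String))) : Int :=
  let d : PySem.Dict String Int := rows.foldl (fun d r =>
    match PySem.List.pyGetD r 2 none with
    | none => d
    | some loc => if d.contains loc then d.insert loc (d.getD loc 0 + 1) else d.insert loc 1)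
    PySem.Dict.empty
  d.keys.foldl (fun count loc => if d.getD loc 0 = 1 then count + 1 else count) 0

-- ===== PORT B =====
-- seen_once.remove(loc) is ported as Set.discard: exact here because it runs only when loc ∈ seen_once.
def num_single_locs_alt (rows : List (List (Option String))) : Int :=
  let st : PySem.Set String × PySem.Set String := rows.foldl (fun st r =>
    match PySem.List.pyGetD r 2 none with
    | none => st
    | some loc =>
      if PySem.Set.contains st.2 loc then st
      else if PySem.Set.contains st.1 loc then (PySem.Set.discard st.1 loc, PySem.Set.add st.2 loc)
      else (PySem.Set.add st.1 loc, st.2))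
    (PySem.Set.empty, PySem.Set.empty)
  PySem.Set.len st.1

-- ===== PRECONDITION & SPEC =====
-- Pre_ excludes only inputs on which A raises IndexError (a row shorter than 3).
def Pre_num_single_locs (rows : List (List (Option String))) : Prop :=
  ∀ r ∈ rows, 3 ≤ r.length
instance (rows : List (List (Option String))) : Decidable (Pre_num_single_locs rows) := by
  unfold Pre_num_single_locs; infer_instance

def pvWitness_num_single_locs : List (List (Option String)) :=
  [[some "a", none, some "x"], [none, none, some "y"], [some "b", none, some "x"], [none, none, none]]

def Spec_num_single_locs (rows : List (List (Option String))) (out : Int) : Prop := out = num_single_locs_alt rows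
instance (rows : List (List (Option String))) (out : Int) : Decidable (Spec_num_single_locs rows out) := by unfold Spec_num_single_locs; infer_instance

-- ===== CLAIM (what is proved, stated in full; the proofs are below) =====
def Claim_equal_num_single_locs : Prop := ∀ (rows : List (List (Option String))), Dom_num_single_locs rows → Pre_num_single_locs rows → Spec_num_single_locs rows (num_single_locs rows)

-- ===== LEMMAS AND PROOFS =====

-- the list of non-None third entries, in row order
def pvLocs (rows : List (List (Option String))) : List String :=
  rows.filterMap (fun r => PySem.List.pyGetD r 2 none)

-- B's loop body, on the location list
def pvStep (st : PySem.Set String × PySem.Set String) (loc : String) :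
    PySem.Set String × PySem.Set String :=
  if PySem.Set.contains st.2 loc then st
  else if PySem.Set.contains st.1 loc then (PySem.Set.discard st.1 loc, PySem.Set.add st.2 loc)
  else (PySem.Set.add st.1 loc, st.2)

-- loop invariant for B: after processing p, the first set holds exactly the locations of p
-- with count 1, the second those with count ≥ 2
lemma pvInv (xs : List String) : ∀ (p o m : List String),
    o.Nodup →
    (∀ k, k ∈ o ↔ k ∈ p ∧ p.count k = 1) →
    (∀ k, k ∈ m ↔ k ∈ p ∧ 2 ≤ p.count k) →
    (xs.foldl pvStep (o, m)).1.Nodup ∧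
      (∀ k, k ∈ (xs.foldl pvStep (o, m)).1 ↔ k ∈ p ++ xs ∧ (p ++ xs).count k = 1) := by
  induction xs with
  | nil =>
    intro p o m ho h1 h2
    simpa using ⟨ho, h1⟩
  | cons x xs ih =>
    intro p o m ho h1 h2
    have hcntx : (p ++ [x]).count x = p.count x + 1 := by
      simp [List.count_append]
    have hcnt' : ∀ k, k ≠ x → (p ++ [x]).count k = p.count k := by
      intro k h
      have h' : ¬x = k := fun hh => h hh.symm
      simp [List.count_append, h']
    have hmem : ∀ k, k ∈ p ++ [x] ↔ k ∈ p ∨ k = x := by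
      intro k; simp
    have happ : p ++ x :: xs = (p ++ [x]) ++ xs := by simp
    simp only [List.foldl_cons]
    rw [happ]
    by_cases hm : x ∈ m
    · -- seen more than once already: state unchanged
      have hstep : pvStep (o, m) x = (o, m) := by
        simp [pvStep, PySem.Set.contains_eq_listContains, hm]
      rw [hstep]
      refine ih (p ++ [x]) o m ho ?_ ?_
      · intro k
        rcases (h2 x).mp hm with ⟨hxp, hx2⟩
        by_cases h : k = x
        · subst h
          constructor
          · intro hko; rcases (h1 k).mp hko with ⟨_, hc⟩; omega
          · intro ⟨_, hc⟩; rw [hcntx] at hc; omega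
        · rw [h1 k, hmem, hcnt' k h]; simp [h]
      · intro k
        rcases (h2 x).mp hm with ⟨hxp, hx2⟩
        by_cases h : k = x
        · subst h
          rw [hmem, hcntx]
          constructor
          · intro _; exact ⟨Or.inl hxp, by omega⟩
          · intro _; exact hm
        · rw [h2 k, hmem, hcnt' k h]; simp [h]
    · by_cases hoo : x ∈ o
      · -- seen exactly once: move from once to more
        have hstep : pvStep (o, m) x = (PySem.Set.discard o x, PySem.Set.add m x) := by
          simp [pvStep, PySem.Set.contains_eq_listContains, hm, hoo]
        rw [hstep]
        rcases (h1 x).mp hoo with ⟨hxp, hx1⟩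
        refine ih (p ++ [x]) _ _ (PySem.Set.nodup_discard o x ho) ?_ ?_
        · intro k
          rw [PySem.Set.mem_discard]
          by_cases h : k = x
          · subst h
            constructor
            · intro ⟨_, h⟩; exact absurd rfl h
            · intro ⟨_, hc⟩; rw [hcntx] at hc; omega
          · rw [h1 k, hmem, hcnt' k h]; simp [h]
        · intro k
          rw [PySem.Set.mem_add]
          by_cases h : k = x
          · subst h
            rw [hmem, hcntx]
            constructor
            · intro _; exact ⟨Or.inl hxp, by omega⟩
            · intro _; right; rfl
          · rw [h2 k, hmem, hcnt' k h]; simp [h]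
      · -- never seen before: x ∉ p (count 0), add to once
        have hx0 : p.count x = 0 := by
          rcases Nat.eq_zero_or_pos (p.count x) with h0 | hpos
          · exact h0
          · exfalso
            have hxp : x ∈ p := List.count_pos_iff.mp hpos
            by_cases h2le : 2 ≤ p.count x
            · exact hm ((h2 x).mpr ⟨hxp, h2le⟩)
            · exact hoo ((h1 x).mpr ⟨hxp, by omega⟩)
        have hxp : x ∉ p := by
          intro h
          have hpos := List.count_pos_iff.mpr h
          omega
        have hstep : pvStep (o, m) x = (PySem.Set.add o x, m) := by
          simp [pvStep, PySem.Set.contains_eq_listContains, hm, hoo]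
        rw [hstep]
        refine ih (p ++ [x]) _ _ (PySem.Set.nodup_add o x ho) ?_ ?_
        · intro k
          rw [PySem.Set.mem_add]
          by_cases h : k = x
          · subst h
            rw [hmem, hcntx]
            constructor
            · intro _; exact ⟨Or.inr rfl, by omega⟩
            · intro _; right; rfl
          · rw [h1 k, hmem, hcnt' k h]; simp [h]
        · intro k
          by_cases h : k = x
          · subst h
            constructor
            · intro hk; exact absurd hk hm
            · intro ⟨_, hc⟩; rw [hcntx] at hc; omega
          · rw [h2 k, hmem, hcnt' k h]; simp [h]

-- A's first loop, reduced to a loop over the location list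
lemma pvFoldA (rows : List (List (Option String))) :
    rows.foldl (fun (d : PySem.Dict String Int) r =>
      match PySem.List.pyGetD r 2 none with
      | none => d
      | some loc => if d.contains loc then d.insert loc (d.getD loc 0 + 1) else d.insert loc 1)
      PySem.Dict.empty =
    (pvLocs rows).foldl (fun (d : PySem.Dict String Int) x => d.insert x (d.getD x 0 + 1))
      PySem.Dict.empty := by
  unfold pvLocs
  rw [List.foldl_filterMap]
  congr 1
  funext d r
  cases PySem.List.pyGetD r 2 none with
  | none => rfl
  | some loc =>
    by_cases h : d.contains loc
    · simp [h]
    · have h0 : d.getD loc 0 = 0 :=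
        PySem.Dict.getD_of_not_contains d 0 (by simpa using h)
      simp [h, h0]

-- B's loop, reduced to a loop over the location list
lemma pvFoldB (rows : List (List (Option String))) :
    rows.foldl (fun (st : PySem.Set String × PySem.Set String) r =>
      match PySem.List.pyGetD r 2 none with
      | none => st
      | some loc =>
        if PySem.Set.contains st.2 loc then st
        else if PySem.Set.contains st.1 loc then (PySem.Set.discard st.1 loc, PySem.Set.add st.2 loc)
        else (PySem.Set.add st.1 loc, st.2))
      (PySem.Set.empty, PySem.Set.empty) =
    (pvLocs rows).foldl pvStep (PySem.Set.empty, PySem.Set.empty) := by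
  unfold pvLocs
  rw [List.foldl_filterMap]
  congr 1
  funext st r
  cases PySem.List.pyGetD r 2 none <;> rfl

-- A's result, as a countP over the distinct locations
lemma pvA_eq (rows : List (List (Option String))) :
    num_single_locs rows =
      ((PySem.Set.ofList (pvLocs rows)).countP
        (fun k => decide ((pvLocs rows).count k = 1)) : Int) := by
  unfold num_single_locs
  show ((rows.foldl (fun (d : PySem.Dict String Int) r =>
      match PySem.List.pyGetD r 2 none with
      | none => d
      | some loc => if d.contains loc then d.insert loc (d.getD loc 0 + 1) else d.insert loc 1)
      PySem.Dict.empty).keys.foldl (fun count loc =>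
        if (rows.foldl (fun (d : PySem.Dict String Int) r =>
          match PySem.List.pyGetD r 2 none with
          | none => d
          | some loc => if d.contains loc then d.insert loc (d.getD loc 0 + 1) else d.insert loc 1)
          PySem.Dict.empty).getD loc 0 = 1 then count + 1 else count) 0) = _
  rw [pvFoldA]
  have hd : ∀ k, ((pvLocs rows).foldl
      (fun (d : PySem.Dict String Int) x => d.insert x (d.getD x 0 + 1))
      PySem.Dict.empty).getD k 0 = ((pvLocs rows).count k : Int) := by
    intro k
    rw [PySem.Dict.getD_foldl_insert_add_one]
    simp
  have hk : ((pvLocs rows).foldl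
      (fun (d : PySem.Dict String Int) x => d.insert x (d.getD x 0 + 1))
      PySem.Dict.empty).keys = PySem.Set.ofList (pvLocs rows) := by
    rw [PySem.Dict.keys_foldl_insert]
    simp [PySem.Set.update_nil_left]
  rw [hk]
  have hfun2 : (fun (count : Int) loc => if ((pvLocs rows).foldl
      (fun (d : PySem.Dict String Int) x => d.insert x (d.getD x 0 + 1))
      PySem.Dict.empty).getD loc 0 = 1 then count + 1 else count) =
      (fun count loc => if (decide ((pvLocs rows).count loc = 1)) = true then count + 1 else count) := by
    funext c k
    rw [hd k]
    by_cases h : (pvLocs rows).count k = 1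
    · simp [h]
    · have hne : ((pvLocs rows).count k : Int) ≠ 1 := by exact_mod_cast h
      simp [h, hne]
  rw [hfun2, PySem.List.foldl_count_if]
  simp

-- ===== VERDICT (by name: the statement is the Claim_ definition above) =====
theorem num_single_locs_spec : Claim_equal_num_single_locs := by
  intro rows _ _
  unfold Spec_num_single_locs
  rw [pvA_eq]
  unfold num_single_locs_alt
  show _ = PySem.Set.len (rows.foldl (fun (st : PySem.Set String × PySem.Set String) r =>
      match PySem.List.pyGetD r 2 none with
      | none => st
      | some loc =>
        if PySem.Set.contains st.2 loc then st
        else if PySem.Set.contains st.1 loc then (PySem.Set.discard st.1 loc, PySem.Set.add st.2 loc)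
        else (PySem.Set.add st.1 loc, st.2))
      (PySem.Set.empty, PySem.Set.empty)).1
  rw [pvFoldB]
  obtain ⟨hnd, hmem⟩ :=
    pvInv (pvLocs rows) [] PySem.Set.empty PySem.Set.empty (by simp [PySem.Set.empty]) (by simp [PySem.Set.empty]) (by simp [PySem.Set.empty])
  simp only [List.nil_append] at hnd hmem
  have hperm : (((pvLocs rows).foldl pvStep (PySem.Set.empty, PySem.Set.empty)).1).Perm
      ((PySem.Set.ofList (pvLocs rows)).filter (fun k => decide ((pvLocs rows).count k = 1))) := by
    rw [List.perm_ext_iff_of_nodup hnd (List.Nodup.filter _ (PySem.Set.nodup_ofList (pvLocs rows)))]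
    intro k
    rw [hmem k, List.mem_filter]
    simp [PySem.Set.mem_ofList]
  rw [List.countP_eq_length_filter, PySem.Set.len, ← hperm.length_eq]
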